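-- pv_equiv track=rewrite | github.com/incolume-jedi/coding-dojo | incolume/py/coding_dojo_jedi/dojo20231129/dojo.py | land_perimeter_0
-- ===== SOURCE A (Python) =====
-- def land_perimeter_0(arr):
--     """Calculate perimeter.
--
--     __author__: https://www.codewars.com/users/egaletsky.
--     """
--     line, column = len(arr), len(arr[0])
--
--     perimeter = 0
--     for i in range(line):
--         for j in range(column):
--             if arr[i][j] == 'X':
--                 if i == 0 or arr[i - 1][j] == 'O':
--                     perimeter += 1
--                 if i == line - 1 or arr[i + 1][j] == 'O':
--                     perimeter += 1
--                 if j == 0 or arr[i][j - 1] == 'O':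
--                     perimeter += 1
--                 if j == column - 1 or arr[i][j + 1] == 'O':
--                     perimeter += 1
--
--     return 'Total land perimeter: ' + str(perimeter)
-- ===== SOURCE B (Python) =====
-- def land_perimeter_0(arr):
--     """Calculate perimeter by counting boundary cells and X-O transitions (edge scan)."""
--     column = len(arr[0])
--     edges = 0
--     if column > 0:
--         # left/right grid boundary + horizontal X-O transitions, one pass per row
--         for row in arr:
--             edges += (row[0] == 'X') + (row[column - 1] == 'X')
--             for j in range(column - 1):
--                 a, b = row[j], row[j + 1]
--                 if (a == 'X' and b == 'O') or (a == 'O' and b == 'X'):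
--                     edges += 1
--         # top/bottom grid boundary + vertical X-O transitions
--         top, bottom = arr[0], arr[-1]
--         for j in range(column):
--             edges += (top[j] == 'X') + (bottom[j] == 'X')
--         for i in range(len(arr) - 1):
--             r, s = arr[i], arr[i + 1]
--             for j in range(column):
--                 a, b = r[j], s[j]
--                 if (a == 'X' and b == 'O') or (a == 'O' and b == 'X'):
--                     edges += 1
--     return 'Total land perimeter: ' + str(edges)
-- ===== Notes on version B (the rewrite author's own statement) =====
-- stated objective: alternative
-- what changed: B replaces A's per-cell four-neighbor test with an edge scan: it counts X cells on the four grid boundaries plus explicit X-O transitions over horizontal and vertical adjacent pairs, instead of testing every neighbor of every cell.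
import Mathlib
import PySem

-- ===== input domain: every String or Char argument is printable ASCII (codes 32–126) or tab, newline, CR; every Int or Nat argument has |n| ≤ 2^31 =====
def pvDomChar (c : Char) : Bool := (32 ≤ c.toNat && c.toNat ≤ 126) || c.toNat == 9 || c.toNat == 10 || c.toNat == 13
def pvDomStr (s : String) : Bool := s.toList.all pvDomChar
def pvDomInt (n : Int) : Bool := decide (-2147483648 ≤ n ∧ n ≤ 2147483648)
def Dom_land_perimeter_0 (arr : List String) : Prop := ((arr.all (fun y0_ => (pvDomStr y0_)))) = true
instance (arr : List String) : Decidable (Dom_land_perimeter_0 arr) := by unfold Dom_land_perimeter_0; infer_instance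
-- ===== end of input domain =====

-- B counts the perimeter by an edge scan (boundary X cells + X-O transitions) instead of A's
-- per-cell four-neighbour test; equivalence is proved on non-empty grids whose rows are at
-- least as long as the first row (exactly where the Python A returns instead of raising).

-- ===== PORT A =====
-- arr[i][j] as A reads it (Python indexing; in-range under Pre_)
def pvCellA (arr : List String) (i j : Int) : Char :=
  PySem.List.pyGetD (PySem.List.pyGetD arr i "").toList j ' '

def land_perimeter_0 (arr : List String) : String :=
  let line : Int := arr.length
  let column : Int := ((PySem.List.pyGetD arr 0 "").toList.length : Int)
  let perimeter : Int :=
    (PySem.List.pyRange 0 line 1).foldl (fun acc i =>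
      (PySem.List.pyRange 0 column 1).foldl (fun acc j =>
        if pvCellA arr i j = 'X' then
          let acc := if i = 0 ∨ pvCellA arr (i - 1) j = 'O' then acc + 1 else acc
          let acc := if i = line - 1 ∨ pvCellA arr (i + 1) j = 'O' then acc + 1 else acc
          let acc := if j = 0 ∨ pvCellA arr i (j - 1) = 'O' then acc + 1 else acc
          let acc := if j = column - 1 ∨ pvCellA arr i (j + 1) = 'O' then acc + 1 else acc
          acc
        else acc) acc) 0
  "Total land perimeter: " ++ PySem.Int.toStr perimeter

-- ===== PORT B =====
def land_perimeter_0_alt (arr : List String) : String :=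
  let column : Int := ((PySem.List.pyGetD arr 0 "").toList.length : Int)
  let edges : Int :=
    if 0 < column then
      -- left/right grid boundary + horizontal X-O transitions, one pass per row
      let e1 := arr.foldl (fun acc row =>
        let r := row.toList
        let acc := acc + (if PySem.List.pyGetD r 0 ' ' = 'X' then 1 else 0)
                       + (if PySem.List.pyGetD r (column - 1) ' ' = 'X' then 1 else 0)
        (PySem.List.pyRange 0 (column - 1) 1).foldl (fun acc j =>
          let a := PySem.List.pyGetD r j ' '
          let b := PySem.List.pyGetD r (j + 1) ' '
          if (a = 'X' ∧ b = 'O') ∨ (a = 'O' ∧ b = 'X') then acc + 1 else acc) acc) 0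
      -- top/bottom grid boundary + vertical X-O transitions
      let top := (PySem.List.pyGetD arr 0 "").toList
      let bottom := (PySem.List.pyGetD arr (-1) "").toList
      let e2 := (PySem.List.pyRange 0 column 1).foldl (fun acc j =>
        acc + (if PySem.List.pyGetD top j ' ' = 'X' then 1 else 0)
            + (if PySem.List.pyGetD bottom j ' ' = 'X' then 1 else 0)) e1
      (PySem.List.pyRange 0 ((arr.length : Int) - 1) 1).foldl (fun acc i =>
        let r := (PySem.List.pyGetD arr i "").toList
        let s := (PySem.List.pyGetD arr (i + 1) "").toList
        (PySem.List.pyRange 0 column 1).foldl (fun acc j =>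
          let a := PySem.List.pyGetD r j ' '
          let b := PySem.List.pyGetD s j ' '
          if (a = 'X' ∧ b = 'O') ∨ (a = 'O' ∧ b = 'X') then acc + 1 else acc) acc) e2
    else 0
  "Total land perimeter: " ++ PySem.Int.toStr edges

-- ===== PRECONDITION & SPEC =====
-- Pre_ excludes exactly the inputs where the Python A raises IndexError: the empty list
-- (len(arr[0])) and grids with a row shorter than the first row (arr[i][j], j < column).
def Pre_land_perimeter_0 (arr : List String) : Prop :=
  arr ≠ [] ∧ ∀ s ∈ arr, (arr.headD "").toList.length ≤ s.toList.length
instance (arr : List String) : Decidable (Pre_land_perimeter_0 arr) := by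
  unfold Pre_land_perimeter_0; infer_instance
def pvWitness_land_perimeter_0 : List String := (["XO", "OX"])

def Spec_land_perimeter_0 (arr : List String) (out : String) : Prop := out = land_perimeter_0_alt arr
instance (arr : List String) (out : String) : Decidable (Spec_land_perimeter_0 arr out) := by
  unfold Spec_land_perimeter_0; infer_instance

-- ===== CLAIM (what is proved, stated in full; the proofs are below) =====
def Claim_equal_land_perimeter_0 : Prop := ∀ (arr : List String), Dom_land_perimeter_0 arr → Pre_land_perimeter_0 arr → Spec_land_perimeter_0 arr (land_perimeter_0 arr)

-- ===== LEMMAS AND PROOFS =====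

-- the grid as a total Nat-indexed function (out-of-range reads are defaults, never hit)
def pvG (arr : List String) (i j : ℕ) : Char := ((arr.getD i "").toList.getD j ' ')

-- a 0/1 indicator of an X-O transition between two adjacent cells
def pvPairC (a b : Char) : Int := if (a = 'X' ∧ b = 'O') ∨ (a = 'O' ∧ b = 'X') then 1 else 0

-- B's per-row amount: left/right boundary + horizontal transitions
def pvRowF (n : ℕ) (row : String) : Int :=
  (if row.toList.getD 0 ' ' = 'X' then 1 else 0)
    + (if row.toList.getD (n - 1) ' ' = 'X' then 1 else 0)
    + ∑ j ∈ Finset.range (n - 1), pvPairC (row.toList.getD j ' ') (row.toList.getD (j + 1) ' ')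

-- A's per-cell contribution, exactly as the port tests it
def pvCInt (arr : List String) (line column : Int) (i j : Int) : Int :=
  if pvCellA arr i j = 'X' then
    (if i = 0 ∨ pvCellA arr (i - 1) j = 'O' then 1 else 0)
    + (if i = line - 1 ∨ pvCellA arr (i + 1) j = 'O' then 1 else 0)
    + (if j = 0 ∨ pvCellA arr i (j - 1) = 'O' then 1 else 0)
    + (if j = column - 1 ∨ pvCellA arr i (j + 1) = 'O' then 1 else 0)
  else 0

theorem pvFoldlSum (N : ℕ) (c : Int → Int) (a : Int) :
    (PySem.List.pyRange 0 (N : Int) 1).foldl (fun acc k => acc + c k) a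
      = a + ∑ k ∈ Finset.range N, c (k : Int) := by
  induction N generalizing a with
  | zero => simp [PySem.List.pyRange_one_eq_nil]
  | succ n ih =>
      have h : ((n + 1 : ℕ) : Int) = (n : Int) + 1 := by push_cast; ring
      rw [h, PySem.List.pyRange_one_succ_right (by positivity), List.foldl_append, ih,
        Finset.sum_range_succ]
      simp; ring

theorem pvFoldlExt {α β : Type} (f g : β → α → β) (h : ∀ acc x, f acc x = g acc x)
    (l : List α) (a : β) : l.foldl f a = l.foldl g a := by
  have : f = g := by funext acc x; exact h acc x
  rw [this]

theorem pvSumMap (l : List String) (F : String → Int) :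
    (l.map F).sum = ∑ i ∈ Finset.range l.length, F (l.getD i "") := by
  induction l with
  | nil => simp
  | cons x xs ih =>
      rw [List.map_cons, List.sum_cons, ih, List.length_cons, Finset.sum_range_succ']
      simp only [List.getD_cons_succ, List.getD_cons_zero]
      ring

-- the 1-D counting identity: per-cell neighbour tests = boundary cells + X-O transitions
theorem pvLineCount (f : ℕ → Char) (n : ℕ) (hn : 0 < n) :
    (∑ j ∈ Finset.range n, (if f j = 'X' then
        ((if j = 0 ∨ f (j - 1) = 'O' then (1 : Int) else 0)
          + (if j = n - 1 ∨ f (j + 1) = 'O' then 1 else 0)) else 0))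
      = (if f 0 = 'X' then 1 else 0) + (if f (n - 1) = 'X' then 1 else 0)
        + ∑ j ∈ Finset.range (n - 1), pvPairC (f j) (f (j + 1)) := by
  obtain ⟨k, rfl⟩ : ∃ k, n = k + 1 := ⟨n - 1, by omega⟩
  simp only [Nat.add_sub_cancel]
  have split : ∀ j : ℕ, (if f j = 'X' then
        ((if j = 0 ∨ f (j - 1) = 'O' then (1 : Int) else 0)
          + (if j = k ∨ f (j + 1) = 'O' then 1 else 0)) else 0)
      = (if f j = 'X' then (if j = 0 ∨ f (j - 1) = 'O' then (1 : Int) else 0) else 0)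
        + (if f j = 'X' then (if j = k ∨ f (j + 1) = 'O' then (1 : Int) else 0) else 0) := by
    intro j; split_ifs <;> ring
  rw [Finset.sum_congr rfl (fun j _ => split j), Finset.sum_add_distrib]
  have hS1 : (∑ j ∈ Finset.range (k + 1),
      (if f j = 'X' then (if j = 0 ∨ f (j - 1) = 'O' then (1 : Int) else 0) else 0))
      = (if f 0 = 'X' then 1 else 0)
        + ∑ j ∈ Finset.range k, (if f (j + 1) = 'X' ∧ f j = 'O' then (1 : Int) else 0) := by
    rw [Finset.sum_range_succ']
    have h0 : (if f 0 = 'X' then (if (0 : ℕ) = 0 ∨ f (0 - 1) = 'O' then (1 : Int) else 0) else 0)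
        = (if f 0 = 'X' then 1 else 0) := by simp
    rw [h0]
    have ht : ∀ j : ℕ, (if f (j + 1) = 'X' then (if j + 1 = 0 ∨ f (j + 1 - 1) = 'O' then (1 : Int) else 0) else 0)
        = (if f (j + 1) = 'X' ∧ f j = 'O' then 1 else 0) := by
      intro j; simp only [Nat.add_sub_cancel, Nat.succ_ne_zero, false_or]
      split_ifs <;> simp_all
    rw [Finset.sum_congr rfl (fun j _ => ht j)]; ring
  have hS2 : (∑ j ∈ Finset.range (k + 1),
      (if f j = 'X' then (if j = k ∨ f (j + 1) = 'O' then (1 : Int) else 0) else 0))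
      = (if f k = 'X' then 1 else 0)
        + ∑ j ∈ Finset.range k, (if f j = 'X' ∧ f (j + 1) = 'O' then (1 : Int) else 0) := by
    rw [Finset.sum_range_succ]
    have hk : (if f k = 'X' then (if k = k ∨ f (k + 1) = 'O' then (1 : Int) else 0) else 0)
        = (if f k = 'X' then 1 else 0) := by simp
    rw [hk]
    have ht : ∀ j ∈ Finset.range k, (if f j = 'X' then (if j = k ∨ f (j + 1) = 'O' then (1 : Int) else 0) else 0)
        = (if f j = 'X' ∧ f (j + 1) = 'O' then 1 else 0) := by
      intro j hj
      have : j ≠ k := by simp at hj; omega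
      split_ifs <;> simp_all
    rw [Finset.sum_congr rfl ht]; ring
  rw [hS1, hS2]
  have hp : ∀ j : ℕ, pvPairC (f j) (f (j + 1))
      = (if f j = 'X' ∧ f (j + 1) = 'O' then (1 : Int) else 0)
        + (if f (j + 1) = 'X' ∧ f j = 'O' then (1 : Int) else 0) := by
    intro j
    unfold pvPairC
    by_cases h1 : f j = 'X' ∧ f (j + 1) = 'O'
    · have h2 : ¬(f j = 'O' ∧ f (j + 1) = 'X') := by
        rintro ⟨ha, -⟩; rw [h1.1] at ha; exact absurd ha (by decide)
      have h3 : ¬(f (j + 1) = 'X' ∧ f j = 'O') := fun h => h2 ⟨h.2, h.1⟩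
      simp [h1]
    · by_cases h2 : f j = 'O' ∧ f (j + 1) = 'X'
      · have h3 : f (j + 1) = 'X' ∧ f j = 'O' := ⟨h2.2, h2.1⟩
        simp [h2]
      · have h3 : ¬(f (j + 1) = 'X' ∧ f j = 'O') := fun h => h2 ⟨h.2, h.1⟩
        simp [h1, h2, h3]
  rw [Finset.sum_congr rfl (fun j _ => hp j), Finset.sum_add_distrib]
  ring

-- A's result as a double sum of per-cell contributions
theorem pvAred (arr : List String) :
    land_perimeter_0 arr = "Total land perimeter: " ++ PySem.Int.toStr
      (∑ i ∈ Finset.range arr.length,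
        ∑ j ∈ Finset.range (arr.getD 0 "").toList.length,
          pvCInt arr arr.length ((arr.getD 0 "").toList.length : Int) (i : Int) (j : Int)) := by
  unfold land_perimeter_0
  simp only [PySem.List.pyGetD_zero]
  congr 1
  have hinner : ∀ (i acc : Int),
      (PySem.List.pyRange 0 ((arr.getD 0 "").toList.length : Int) 1).foldl (fun acc j =>
        if pvCellA arr i j = 'X' then
          let acc := if i = 0 ∨ pvCellA arr (i - 1) j = 'O' then acc + 1 else acc
          let acc := if i = (arr.length : Int) - 1 ∨ pvCellA arr (i + 1) j = 'O' then acc + 1 else acc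
          let acc := if j = 0 ∨ pvCellA arr i (j - 1) = 'O' then acc + 1 else acc
          let acc := if j = ((arr.getD 0 "").toList.length : Int) - 1 ∨ pvCellA arr i (j + 1) = 'O' then acc + 1 else acc
          acc
        else acc) acc
      = acc + ∑ j ∈ Finset.range (arr.getD 0 "").toList.length,
          pvCInt arr arr.length ((arr.getD 0 "").toList.length : Int) i (j : Int) := by
    intro i acc
    rw [pvFoldlExt _ (fun acc j => acc + pvCInt arr arr.length ((arr.getD 0 "").toList.length : Int) i j)
      (by intro acc j; simp only [pvCInt]; split_ifs <;> ring)]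
    exact pvFoldlSum _ _ acc
  rw [pvFoldlExt _ (fun acc i => acc + ∑ j ∈ Finset.range (arr.getD 0 "").toList.length,
        pvCInt arr arr.length ((arr.getD 0 "").toList.length : Int) i (j : Int))
      (fun acc i => hinner i acc)]
  rw [pvFoldlSum]
  simp

-- B's result as boundary + transition sums
theorem pvBred (arr : List String) (hne : arr ≠ [])
    (hn : 0 < (arr.getD 0 "").toList.length) :
    land_perimeter_0_alt arr = "Total land perimeter: " ++ PySem.Int.toStr
      (∑ i ∈ Finset.range arr.length, pvRowF (arr.getD 0 "").toList.length (arr.getD i "")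
        + (∑ j ∈ Finset.range (arr.getD 0 "").toList.length,
            ((if pvG arr 0 j = 'X' then 1 else 0)
              + (if pvG arr (arr.length - 1) j = 'X' then (1 : Int) else 0))
          + ∑ i ∈ Finset.range (arr.length - 1),
              ∑ j ∈ Finset.range (arr.getD 0 "").toList.length,
                pvPairC (pvG arr i j) (pvG arr (i + 1) j))) := by
  have hm : 1 ≤ arr.length := List.length_pos_iff.mpr hne
  have hcn : ((arr.getD 0 "").toList.length : Int) - 1
      = (((arr.getD 0 "").toList.length - 1 : ℕ) : Int) := by omega
  have hcm : ((arr.length : Int)) - 1 = ((arr.length - 1 : ℕ) : Int) := by omega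
  have hbot : (PySem.List.pyGetD arr (-1) "") = arr.getD (arr.length - 1) "" := by
    rw [PySem.List.pyGetD_neg_one (h := hne), List.getLast_eq_getElem,
      List.getD_eq_getElem arr "" (by have := List.length_pos_iff.mpr hne; omega)]
  unfold land_perimeter_0_alt
  simp only [PySem.List.pyGetD_zero, hbot]
  rw [if_pos (by exact_mod_cast hn)]
  congr 1
  -- rows pass
  have hrow : ∀ (acc : Int) (row : String),
      (PySem.List.pyRange 0 (((arr.getD 0 "").toList.length : Int) - 1) 1).foldl (fun acc j =>
        let a := PySem.List.pyGetD row.toList j ' '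
        let b := PySem.List.pyGetD row.toList (j + 1) ' '
        if (a = 'X' ∧ b = 'O') ∨ (a = 'O' ∧ b = 'X') then acc + 1 else acc)
        (acc + (if row.toList.getD 0 ' ' = 'X' then 1 else 0)
             + (if PySem.List.pyGetD row.toList (((arr.getD 0 "").toList.length : Int) - 1) ' ' = 'X' then 1 else 0))
      = acc + pvRowF (arr.getD 0 "").toList.length row := by
    intro acc row
    rw [hcn,
      pvFoldlExt _ (fun acc j => acc + pvPairC (PySem.List.pyGetD row.toList j ' ')
          (PySem.List.pyGetD row.toList (j + 1) ' '))
        (by intro acc j; simp only [pvPairC]; split_ifs <;> ring),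
      pvFoldlSum]
    have hsum : ∀ k : ℕ, pvPairC (PySem.List.pyGetD row.toList (k : Int) ' ')
          (PySem.List.pyGetD row.toList ((k : Int) + 1) ' ')
        = pvPairC (row.toList.getD k ' ') (row.toList.getD (k + 1) ' ') := by
      intro k
      have h1 : ((k : Int) + 1) = ((k + 1 : ℕ) : Int) := by push_cast; ring
      rw [h1, PySem.List.pyGetD_natCast, PySem.List.pyGetD_natCast]
    rw [Finset.sum_congr rfl (fun k _ => hsum k)]
    simp only [pvRowF, PySem.List.pyGetD_natCast]
    ring
  rw [pvFoldlExt _ (fun acc row => acc + pvRowF (arr.getD 0 "").toList.length row)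
      (fun acc row => hrow acc row),
    PySem.List.foldl_add, pvSumMap]
  -- top/bottom pass
  rw [pvFoldlExt (fun acc j => acc
        + (if PySem.List.pyGetD (arr.getD 0 "").toList j ' ' = 'X' then (1 : Int) else 0)
        + (if PySem.List.pyGetD (arr.getD (arr.length - 1) "").toList j ' ' = 'X' then 1 else 0))
      (fun acc j => acc
        + ((if PySem.List.pyGetD (arr.getD 0 "").toList j ' ' = 'X' then (1 : Int) else 0)
          + (if PySem.List.pyGetD (arr.getD (arr.length - 1) "").toList j ' ' = 'X' then 1 else 0)))
      (by intro acc j; ring),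
    pvFoldlSum]
  have htb : ∀ k : ℕ,
      ((if PySem.List.pyGetD (arr.getD 0 "").toList (k : Int) ' ' = 'X' then (1 : Int) else 0)
        + (if PySem.List.pyGetD (arr.getD (arr.length - 1) "").toList (k : Int) ' ' = 'X' then 1 else 0))
      = ((if pvG arr 0 k = 'X' then 1 else 0)
        + (if pvG arr (arr.length - 1) k = 'X' then (1 : Int) else 0)) := by
    intro k; simp [pvG]
  rw [Finset.sum_congr rfl (fun k _ => htb k)]
  -- vertical pass
  have hvert : ∀ (acc : Int) (i : Int),
      (PySem.List.pyRange 0 ((arr.getD 0 "").toList.length : Int) 1).foldl (fun acc j =>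
        let a := PySem.List.pyGetD (PySem.List.pyGetD arr i "").toList j ' '
        let b := PySem.List.pyGetD (PySem.List.pyGetD arr (i + 1) "").toList j ' '
        if (a = 'X' ∧ b = 'O') ∨ (a = 'O' ∧ b = 'X') then acc + 1 else acc) acc
      = acc + ∑ j ∈ Finset.range (arr.getD 0 "").toList.length,
          pvPairC (PySem.List.pyGetD (PySem.List.pyGetD arr i "").toList (j : Int) ' ')
            (PySem.List.pyGetD (PySem.List.pyGetD arr (i + 1) "").toList (j : Int) ' ') := by
    intro acc i
    rw [pvFoldlExt _ (fun acc j => acc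
        + pvPairC (PySem.List.pyGetD (PySem.List.pyGetD arr i "").toList j ' ')
            (PySem.List.pyGetD (PySem.List.pyGetD arr (i + 1) "").toList j ' '))
        (by intro acc j; simp only [pvPairC]; split_ifs <;> ring),
      pvFoldlSum]
  rw [hcm, pvFoldlExt _ (fun acc i => acc
        + ∑ j ∈ Finset.range (arr.getD 0 "").toList.length,
            pvPairC (PySem.List.pyGetD (PySem.List.pyGetD arr i "").toList (j : Int) ' ')
              (PySem.List.pyGetD (PySem.List.pyGetD arr (i + 1) "").toList (j : Int) ' '))
      (fun acc i => hvert acc i),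
    pvFoldlSum]
  have hvv : ∀ k : ℕ, (∑ j ∈ Finset.range (arr.getD 0 "").toList.length,
        pvPairC (PySem.List.pyGetD (PySem.List.pyGetD arr (k : Int) "").toList (j : Int) ' ')
          (PySem.List.pyGetD (PySem.List.pyGetD arr ((k : Int) + 1) "").toList (j : Int) ' '))
      = ∑ j ∈ Finset.range (arr.getD 0 "").toList.length, pvPairC (pvG arr k j) (pvG arr (k + 1) j) := by
    intro k
    apply Finset.sum_congr rfl
    intro j _
    have h1 : ((k : Int) + 1) = ((k + 1 : ℕ) : Int) := by push_cast; ring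
    rw [h1]
    simp only [PySem.List.pyGetD_natCast, pvG]
  rw [Finset.sum_congr rfl (fun k _ => hvv k)]
  ring

-- casting A's per-cell contribution to Nat indices and splitting it into the
-- vertical and horizontal halves
theorem pvCIntCast (arr : List String) (hm : 1 ≤ arr.length)
    (hn : 1 ≤ (arr.getD 0 "").toList.length) (i j : ℕ) :
    pvCInt arr arr.length ((arr.getD 0 "").toList.length : Int) (i : Int) (j : Int)
      = (if pvG arr i j = 'X' then
          ((if i = 0 ∨ pvG arr (i - 1) j = 'O' then (1 : Int) else 0)
            + (if i = arr.length - 1 ∨ pvG arr (i + 1) j = 'O' then 1 else 0)) else 0)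
        + (if pvG arr i j = 'X' then
          ((if j = 0 ∨ pvG arr i (j - 1) = 'O' then (1 : Int) else 0)
            + (if j = (arr.getD 0 "").toList.length - 1 ∨ pvG arr i (j + 1) = 'O' then 1 else 0)) else 0) := by
  have hcell : ∀ a b : ℕ, pvCellA arr (a : Int) (b : Int) = pvG arr a b := by
    intro a b; simp [pvCellA, pvG]
  have c0 : pvCellA arr (i : Int) (j : Int) = pvG arr i j := hcell i j
  have c1 : ((i : Int) = 0 ∨ pvCellA arr ((i : Int) - 1) (j : Int) = 'O')
      ↔ (i = 0 ∨ pvG arr (i - 1) j = 'O') := by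
    by_cases hi : i = 0
    · subst hi; simp
    · have h1 : ((i : Int) - 1) = ((i - 1 : ℕ) : Int) := by omega
      rw [h1, hcell]
      exact or_congr (by omega) Iff.rfl
  have c2 : ((i : Int) = (arr.length : Int) - 1 ∨ pvCellA arr ((i : Int) + 1) (j : Int) = 'O')
      ↔ (i = arr.length - 1 ∨ pvG arr (i + 1) j = 'O') := by
    have h1 : ((i : Int) + 1) = ((i + 1 : ℕ) : Int) := by push_cast; ring
    rw [h1, hcell]
    exact or_congr (by omega) Iff.rfl
  have c3 : ((j : Int) = 0 ∨ pvCellA arr (i : Int) ((j : Int) - 1) = 'O')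
      ↔ (j = 0 ∨ pvG arr i (j - 1) = 'O') := by
    by_cases hj : j = 0
    · subst hj; simp
    · have h1 : ((j : Int) - 1) = ((j - 1 : ℕ) : Int) := by omega
      rw [h1, hcell]
      exact or_congr (by omega) Iff.rfl
  have c4 : ((j : Int) = ((arr.getD 0 "").toList.length : Int) - 1 ∨ pvCellA arr (i : Int) ((j : Int) + 1) = 'O')
      ↔ (j = (arr.getD 0 "").toList.length - 1 ∨ pvG arr i (j + 1) = 'O') := by
    have h1 : ((j : Int) + 1) = ((j + 1 : ℕ) : Int) := by push_cast; ring
    rw [h1, hcell]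
    exact or_congr (by omega) Iff.rfl
  rw [pvCInt, c0]
  rw [if_congr c1 rfl rfl, if_congr c2 rfl rfl, if_congr c3 rfl rfl, if_congr c4 rfl rfl]
  split_ifs <;> ring

-- the main equivalence
theorem pvMain (arr : List String) (hne : arr ≠ [])
    (hlen : ∀ s ∈ arr, (arr.headD "").toList.length ≤ s.toList.length) :
    land_perimeter_0 arr = land_perimeter_0_alt arr := by
  have hm : 1 ≤ arr.length := List.length_pos_iff.mpr hne
  by_cases hn : (arr.getD 0 "").toList.length = 0
  · -- empty first row: both count 0
    rw [pvAred]
    unfold land_perimeter_0_alt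
    simp only [PySem.List.pyGetD_zero]
    rw [if_neg (by omega)]
    congr 1
    have hz : ∀ i : ℕ, (∑ j ∈ Finset.range (arr.getD 0 "").toList.length,
        pvCInt arr arr.length ((arr.getD 0 "").toList.length : Int) (i : Int) (j : Int)) = 0 := by
      intro i; rw [hn]; simp
    rw [Finset.sum_congr rfl (fun i _ => hz i)]
    simp
  · have hn1 : 1 ≤ (arr.getD 0 "").toList.length := by omega
    rw [pvAred, pvBred arr hne (by omega)]
    congr 2
    rw [Finset.sum_congr rfl (fun i _ => Finset.sum_congr rfl
        (fun j _ => pvCIntCast arr hm hn1 i j))]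
    conv_lhs => rw [Finset.sum_congr rfl (fun i _ => Finset.sum_add_distrib), Finset.sum_add_distrib]
    -- vertical half: sum over columns of the 1-D identity
    have hvert : (∑ i ∈ Finset.range arr.length,
        ∑ j ∈ Finset.range (arr.getD 0 "").toList.length,
          (if pvG arr i j = 'X' then
            ((if i = 0 ∨ pvG arr (i - 1) j = 'O' then (1 : Int) else 0)
              + (if i = arr.length - 1 ∨ pvG arr (i + 1) j = 'O' then 1 else 0)) else 0))
        = ∑ j ∈ Finset.range (arr.getD 0 "").toList.length,
            ((if pvG arr 0 j = 'X' then 1 else 0)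
              + (if pvG arr (arr.length - 1) j = 'X' then (1 : Int) else 0))
          + ∑ i ∈ Finset.range (arr.length - 1),
              ∑ j ∈ Finset.range (arr.getD 0 "").toList.length,
                pvPairC (pvG arr i j) (pvG arr (i + 1) j) := by
      rw [Finset.sum_comm]
      have hcol : ∀ j : ℕ, (∑ i ∈ Finset.range arr.length,
          (if pvG arr i j = 'X' then
            ((if i = 0 ∨ pvG arr (i - 1) j = 'O' then (1 : Int) else 0)
              + (if i = arr.length - 1 ∨ pvG arr (i + 1) j = 'O' then 1 else 0)) else 0))
          = (if pvG arr 0 j = 'X' then 1 else 0)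
            + (if pvG arr (arr.length - 1) j = 'X' then (1 : Int) else 0)
            + ∑ i ∈ Finset.range (arr.length - 1),
                pvPairC (pvG arr i j) (pvG arr (i + 1) j) := by
        intro j
        exact pvLineCount (fun i => pvG arr i j) arr.length hm
      rw [Finset.sum_congr rfl (fun j _ => hcol j)]
      conv_lhs => rw [Finset.sum_add_distrib]
      congr 1
      exact Finset.sum_comm
    -- horizontal half: the 1-D identity per row
    have hhor : ∀ i : ℕ, (∑ j ∈ Finset.range (arr.getD 0 "").toList.length,
        (if pvG arr i j = 'X' then
          ((if j = 0 ∨ pvG arr i (j - 1) = 'O' then (1 : Int) else 0)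
            + (if j = (arr.getD 0 "").toList.length - 1 ∨ pvG arr i (j + 1) = 'O' then 1 else 0)) else 0))
        = pvRowF (arr.getD 0 "").toList.length (arr.getD i "") := by
      intro i
      rw [pvLineCount (pvG arr i) (arr.getD 0 "").toList.length hn1]
      simp [pvRowF, pvG]
    rw [Finset.sum_congr rfl (fun i _ => hhor i), hvert]
    ring

-- ===== VERDICT (by name: the statement is the Claim_ definition above) =====
theorem land_perimeter_0_spec : Claim_equal_land_perimeter_0 := by
  intro arr _ hpre
  exact pvMain arr hpre.1 hpre.2
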